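-- pv_equiv track=rewrite | github.com/UdayKiranPadhy/Leetcode | 2125-number-of-laser-beams-in-a-bank/2125-number-of-laser-beams-in-a-bank.py | numberOfBeams
-- ===== SOURCE A (Python) =====
-- from typing import List
--
-- def numberOfBeams(bank: List[str]) -> int:
--     # Count the security devices of each row
--     security_count = [row.count("1") for row in bank if row.count("1") > 0]
--
--     if len(security_count) < 2:
--         return 0
--
--     ans = 0
--     for i in range(1,len(security_count)):
--         ans += security_count[i-1] * security_count[i]
--     return ans
-- ===== SOURCE B (Python) =====
-- def numberOfBeams(bank):
--     # Divide and conquer: each half reports (beams, first nonzero count, last nonzero count);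
--     # combining adds a cross term last(left)*first(right).
--     def solve(rows):
--         if not rows:
--             return (0, None, None)
--         if len(rows) == 1:
--             c = rows[0].count("1")
--             return (0, c, c) if c > 0 else (0, None, None)
--         mid = len(rows) // 2
--         aL, fL, lL = solve(rows[:mid])
--         aR, fR, lR = solve(rows[mid:])
--         cross = lL * fR if lL is not None and fR is not None else 0
--         return (aL + aR + cross,
--                 fL if fL is not None else fR,
--                 lR if lR is not None else lL)
--     return solve(bank)[0]
-- ===== Notes on version B (the rewrite author's own statement) =====
-- stated objective: alternative
-- what changed: Replaces A's two-stage pipeline (materialize the filtered list of '1'-counts, then an index loop over adjacent pairs) by a divide-and-conquer recursion that splits the bank in half, each half returning (beams, first nonzero count, last nonzero count), combined with a cross term last(left)*first(right).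
import Mathlib
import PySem

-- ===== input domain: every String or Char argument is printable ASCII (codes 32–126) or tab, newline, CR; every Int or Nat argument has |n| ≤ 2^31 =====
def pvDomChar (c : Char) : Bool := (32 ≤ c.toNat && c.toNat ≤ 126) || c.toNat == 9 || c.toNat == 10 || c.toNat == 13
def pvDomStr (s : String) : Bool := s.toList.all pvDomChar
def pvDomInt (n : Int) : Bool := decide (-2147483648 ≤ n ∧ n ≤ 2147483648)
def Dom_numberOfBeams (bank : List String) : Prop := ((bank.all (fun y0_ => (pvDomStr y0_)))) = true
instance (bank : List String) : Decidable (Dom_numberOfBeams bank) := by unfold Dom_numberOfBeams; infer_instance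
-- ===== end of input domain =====

-- B replaces A's filtered-list + index-loop pipeline by a divide-and-conquer recursion
-- splitting the bank in half and combining (beams, first, last nonzero counts) (alternative).


-- ===== PORT A =====
-- row.count("1") as an Int
def pvCnt (row : String) : Int := (PySem.Str.count row "1" : Int)

def numberOfBeams (bank : List String) : Int :=
  -- security_count = [row.count("1") for row in bank if row.count("1") > 0]
  let sc : List Int :=
    bank.foldl (fun acc row => if pvCnt row > 0 then acc ++ [pvCnt row] else acc) []
  if (sc.length : Int) < 2 then 0
  else
    (PySem.List.pyRange 1 (sc.length : Int) 1).foldl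
      (fun ans i => ans + PySem.List.pyGetD sc (i - 1) 0 * PySem.List.pyGetD sc i 0) 0

-- ===== PORT B =====
-- solve(rows) of Source B: (beams, first nonzero '1'-count, last nonzero '1'-count)
def pvSolve (rows : List String) : Int × Option Int × Option Int :=
  match h : rows with
  | [] => (0, none, none)
  | [r] =>
    let c := pvCnt r
    if c > 0 then (0, some c, some c) else (0, none, none)
  | _ :: _ :: _ =>
    let mid := rows.length / 2
    let (aL, fL, lL) := pvSolve (rows.take mid)
    let (aR, fR, lR) := pvSolve (rows.drop mid)
    let cross := match lL, fR with
      | some l, some f => l * f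
      | _, _ => 0
    (aL + aR + cross,
     (match fL with | some v => some v | none => fR),
     (match lR with | some v => some v | none => lL))
termination_by rows.length
decreasing_by
  · simp_all [List.length_take]; omega
  · simp_all [List.length_drop]; omega

def numberOfBeams_alt (bank : List String) : Int := (pvSolve bank).1

-- ===== PRECONDITION & SPEC =====
def Spec_numberOfBeams (bank : List String) (out : Int) : Prop := out = numberOfBeams_alt bank
instance (bank : List String) (out : Int) : Decidable (Spec_numberOfBeams bank out) := by unfold Spec_numberOfBeams; infer_instance

-- ===== CLAIM (what is proved, stated in full; the proofs are below) =====
def Claim_equal_numberOfBeams : Prop := ∀ (bank : List String), Dom_numberOfBeams bank → Spec_numberOfBeams bank (numberOfBeams bank)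

-- ===== LEMMAS AND PROOFS =====

-- the filtered '1'-count list of a bank
def pvCs (l : List String) : List Int := (l.filter (fun r => pvCnt r > 0)).map pvCnt

-- chain prev cs = sum of products of adjacent elements of prev :: cs
def pvChain : Int → List Int → Int
  | _, [] => 0
  | prev, c :: cs => prev * c + pvChain c cs

-- sum of products of adjacent elements of cs
def pvChain1 : List Int → Int
  | [] => 0
  | c :: t => pvChain c t

-- A's comprehension builds the filtered-then-mapped count list
theorem pvA_list (l : List String) (acc : List Int) :
    l.foldl (fun acc row => if pvCnt row > 0 then acc ++ [pvCnt row] else acc) acc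
      = acc ++ pvCs l := by
  induction l generalizing acc with
  | nil => simp [pvCs]
  | cons r t ih =>
    by_cases h : pvCnt r > 0 <;> simp [pvCs, h, ih]

-- A's index loop over the count list computes pvChain of head and tail
theorem pvA_loop (cs : List Int) (n : Nat) :
    ∀ (a ans : Int), 1 ≤ a → ((cs.length : Int) - a).toNat = n →
    (PySem.List.pyRange a (cs.length : Int) 1).foldl
        (fun ans i => ans + PySem.List.pyGetD cs (i - 1) 0 * PySem.List.pyGetD cs i 0) ans
      = ans + pvChain (PySem.List.pyGetD cs (a - 1) 0) (cs.drop a.toNat) := by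
  induction n with
  | zero =>
    intro a ans ha h
    have hle : (cs.length : Int) ≤ a := by omega
    rw [PySem.List.pyRange_one_eq_nil hle]
    have : cs.length ≤ a.toNat := by omega
    simp [List.drop_eq_nil_of_le this, pvChain]
  | succ n ih =>
    intro a ans ha h
    have hlt : a < (cs.length : Int) := by omega
    rw [PySem.List.pyRange_one_cons hlt]
    have hna : a.toNat < cs.length := by omega
    have hget : PySem.List.pyGetD cs a 0 = cs[a.toNat] := by
      conv_lhs => rw [show a = ((a.toNat : Nat) : Int) from by omega]
      rw [PySem.List.pyGetD_natCast, List.getD_eq_getElem _ _ hna]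
    have hdrop : cs.drop a.toNat = cs[a.toNat] :: cs.drop (a.toNat + 1) :=
      List.drop_eq_getElem_cons hna
    have h1 : (1 : Int) ≤ a + 1 := by omega
    have h2 : ((cs.length : Int) - (a + 1)).toNat = n := by omega
    have := ih (a + 1) (ans + PySem.List.pyGetD cs (a - 1) 0 * PySem.List.pyGetD cs a 0) h1 h2
    simp only [List.foldl_cons] at *
    rw [this]
    have hnat1 : (a + 1).toNat = a.toNat + 1 := by omega
    simp only [add_sub_cancel_right, hdrop, pvChain, hget, hnat1]
    ring

-- A's result is the adjacent-product sum of the filtered count list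
theorem pvA_eq (bank : List String) : numberOfBeams bank = pvChain1 (pvCs bank) := by
  unfold numberOfBeams
  rw [pvA_list]
  simp only [List.nil_append]
  match hcs : pvCs bank with
  | [] => simp [pvChain1]
  | [c] => simp [pvChain1, pvChain]
  | c :: d :: t =>
    have hlen : ¬ ((((c :: d :: t : List Int).length : Int)) < 2) := by simp
    rw [if_neg hlen]
    have := pvA_loop (c :: d :: t) (((c :: d :: t : List Int).length : Int) - 1).toNat 1 0 (by omega) rfl
    rw [this]
    simp [PySem.List.pyGetD_zero_cons, pvChain1]

-- adjacent-product sum over an append: halves plus the cross term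
theorem pvChain1_append (xs ys : List Int) :
    pvChain1 (xs ++ ys)
      = pvChain1 xs + pvChain1 ys +
        (match xs.getLast?, ys.head? with
         | some l, some f => l * f
         | _, _ => 0) := by
  induction xs with
  | nil => cases ys <;> simp [pvChain1]
  | cons a t ih =>
    cases t with
    | nil =>
      cases ys with
      | nil => simp [pvChain1, pvChain]
      | cons c u => simp [pvChain1, pvChain]; ring
    | cons b t2 =>
      have : pvChain1 (a :: b :: t2 ++ ys) = a * b + pvChain1 (b :: t2 ++ ys) := by
        simp [pvChain1, pvChain]
      rw [this, ih]
      have : pvChain1 (a :: b :: t2) = a * b + pvChain1 (b :: t2) := by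
        simp [pvChain1, pvChain]
      rw [this]
      have hl : (a :: b :: t2).getLast? = (b :: t2).getLast? := by simp
      rw [hl]
      cases h1 : (b :: t2).getLast? <;> cases h2 : ys.head? <;> simp <;> ring

-- pvCs distributes over append
theorem pvCs_append (xs ys : List String) : pvCs (xs ++ ys) = pvCs xs ++ pvCs ys := by
  simp [pvCs]

-- combining the two halves' (chain, head, last) summaries
theorem pvCombine (L R : List Int) :
    (pvChain1 L + pvChain1 R +
       (match L.getLast?, R.head? with | some l, some f => l * f | _, _ => 0),
     (match L.head? with | some v => some v | none => R.head?),
     (match R.getLast? with | some v => some v | none => L.getLast?))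
      = (pvChain1 (L ++ R), (L ++ R).head?, (L ++ R).getLast?) := by
  rw [pvChain1_append]
  cases L with
  | nil => cases hR : R.getLast? <;> simp [pvChain1, hR]
  | cons a t =>
    cases R with
    | nil => cases hL : (a :: t).getLast? <;> simp [pvChain1, hL]
    | cons c u =>
      obtain ⟨x, hx⟩ := Option.isSome_iff_exists.mp (List.getLast?_isSome.mpr (List.cons_ne_nil a t))
      obtain ⟨y, hy⟩ := Option.isSome_iff_exists.mp (List.getLast?_isSome.mpr (List.cons_ne_nil c u))
      have hgl : (a :: (t ++ c :: u)).getLast? = some y := by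
        rw [show (a :: (t ++ c :: u)) = (a :: t) ++ (c :: u) from rfl,
            List.getLast?_append, hy]
        rfl
      simp [hx, hy, hgl]

-- B's recursion computes (chain, head, last) of the filtered count list
theorem pvSolve_eq (rows : List String) :
    pvSolve rows = (pvChain1 (pvCs rows), (pvCs rows).head?, (pvCs rows).getLast?) := by
  match rows with
  | [] => simp [pvSolve, pvCs, pvChain1]
  | [r] =>
    by_cases hc : pvCnt r > 0 <;>
      simp [pvSolve, pvCs, pvChain1, pvChain, hc]
  | x :: y :: t =>
    rw [pvSolve]
    have hmid1 : 1 ≤ (x :: y :: t).length / 2 := by simp; omega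
    have hmid2 : (x :: y :: t).length / 2 < (x :: y :: t).length := by simp; omega
    have ih1 := pvSolve_eq ((x :: y :: t).take ((x :: y :: t).length / 2))
    have ih2 := pvSolve_eq ((x :: y :: t).drop ((x :: y :: t).length / 2))
    rw [ih1, ih2]
    have happ : (x :: y :: t) =
        (x :: y :: t).take ((x :: y :: t).length / 2) ++ (x :: y :: t).drop ((x :: y :: t).length / 2) := by
      simp
    conv_rhs => rw [happ]
    rw [pvCs_append]
    exact pvCombine _ _
termination_by rows.length

-- ===== VERDICT (by name: the statement is the Claim_ definition above) =====
theorem numberOfBeams_spec : Claim_equal_numberOfBeams := by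
  intro bank _
  unfold Spec_numberOfBeams numberOfBeams_alt
  rw [pvA_eq, pvSolve_eq]
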